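-- pv_equiv track=rewrite | github.com/RifatIbnAlam/resumeforge-atlas | backend/app/services/optimizer.py | _dedupe_resume_text
-- ===== SOURCE A (Python) =====
-- def _dedupe_resume_text(text: str) -> str:
--     lines = text.splitlines()
--     has_technical_skills = any(
--         line.strip().lower().rstrip(":") == "technical skills" for line in lines
--     )
--     if not has_technical_skills:
--         return text
--
--     normalized: list[str] = []
--     current_section = ""
--     for raw in lines:
--         stripped = raw.strip()
--         heading_candidate = stripped.lower().rstrip(":")
--         if heading_candidate in {
--             "summary",
--             "core competencies",
--             "technical skills",
--             "professional experience",
--             "education",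
--             "certifications & training",
--             "additional information",
--             "honors",
--         }:
--             current_section = heading_candidate
--
--         if current_section == "core competencies":
--             cleaned = stripped.lstrip("-").lstrip("•").strip().lower()
--             if cleaned.startswith("tools:"):
--                 continue
--
--         normalized.append(raw)
--
--     return "\n".join(normalized).strip()
-- ===== SOURCE B (Python) =====
-- _HEADINGS = {
--     "summary",
--     "core competencies",
--     "technical skills",
--     "professional experience",
--     "education",
--     "certifications & training",
--     "additional information",
--     "honors",
-- }
--
--
-- def _norm_heading(line: str) -> str:
--     return line.strip().lower().rstrip(":")
--
--
-- def _is_tools_line(line: str) -> bool: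
--     cleaned = line.strip().lstrip("-").lstrip("•").strip().lower()
--     return cleaned.startswith("tools:")
--
--
-- def _segments(lines: list[str]) -> list[tuple[str, list[str]]]:
--     """Partition lines into contiguous segments labelled by their section."""
--     segs: list[tuple[str, list[str]]] = []
--     label = ""
--     cur: list[str] = []
--     for line in lines:
--         h = _norm_heading(line)
--         if h in _HEADINGS and h != label:
--             if cur:
--                 segs.append((label, cur))
--             label = h
--             cur = [line]
--         else:
--             cur.append(line)
--     if cur:
--         segs.append((label, cur))
--     return segs
--
--
-- def _dedupe_resume_text(text: str) -> str:
--     lines = text.splitlines()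
--     if all(_norm_heading(line) != "technical skills" for line in lines):
--         return text
--     out: list[str] = []
--     for label, seg in _segments(lines):
--         if label == "core competencies":
--             out.extend(line for line in seg if not _is_tools_line(line))
--         else:
--             out.extend(seg)
--     return "\n".join(out).strip()
-- ===== Notes on version B (the rewrite author's own statement) =====
-- stated objective: alternative
-- what changed: B first partitions the lines into contiguous labelled section segments, then a second segment-level pass filters the tool-listing lines only inside segments of the competencies section and flattens, instead of A's single stateful line loop.
import Mathlib
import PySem

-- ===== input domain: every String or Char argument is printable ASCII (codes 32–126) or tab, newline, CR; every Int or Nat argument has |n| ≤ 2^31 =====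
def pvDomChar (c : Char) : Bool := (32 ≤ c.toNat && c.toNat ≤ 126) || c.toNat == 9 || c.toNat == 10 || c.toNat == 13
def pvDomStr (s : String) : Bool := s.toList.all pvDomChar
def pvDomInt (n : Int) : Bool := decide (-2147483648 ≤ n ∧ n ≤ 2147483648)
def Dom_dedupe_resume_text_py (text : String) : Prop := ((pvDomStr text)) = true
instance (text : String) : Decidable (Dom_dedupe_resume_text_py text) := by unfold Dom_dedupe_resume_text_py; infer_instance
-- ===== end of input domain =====

-- B restructures A's single stateful line loop into a segment-partition pass plus a
-- per-segment filtering pass; same output, no speed claim.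

-- shared helpers (the same Python subexpressions appear in A and B)
def pvHeadings : List (List Char) :=
  ["summary".toList, "core competencies".toList, "technical skills".toList,
   "professional experience".toList, "education".toList,
   "certifications & training".toList, "additional information".toList,
   "honors".toList]

-- line.strip().lower().rstrip(":")  — rstrip(":") ported by hand (drop trailing ':'), exact
def pvHeadCand (raw : List Char) : List Char :=
  ((PySem.Chars.lower (PySem.Chars.strip raw)).reverse.dropWhile (· == ':')).reverse

-- line.strip().lstrip("-").lstrip("•").strip().lower().startswith("tools:")
-- lstrip with a one-char argument ported by hand (dropWhile), exact
def pvIsTools (raw : List Char) : Bool :=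
  PySem.Chars.startswith
    (PySem.Chars.lower (PySem.Chars.strip
      (((PySem.Chars.strip raw).dropWhile (· == '-')).dropWhile (· == '•'))))
    "tools:".toList

-- ===== PORT A =====
def dedupe_resume_text_py (text : String) : String :=
  let lines := PySem.Str.splitlines text
  let has_technical_skills :=
    lines.any (fun line => pvHeadCand line.toList == "technical skills".toList)
  if !has_technical_skills then text
  else
    let st := lines.foldl
      (fun (st : List Char × List String) raw =>
        let heading_candidate := pvHeadCand raw.toList
        let current_section :=
          if pvHeadings.contains heading_candidate then heading_candidate else st.1
        if current_section == "core competencies".toList && pvIsTools raw.toList then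
          (current_section, st.2)
        else
          (current_section, st.2 ++ [raw]))
      ("".toList, [])
    PySem.Str.strip (PySem.Str.join "\n" st.2)

-- ===== PORT B =====
def pvSegLoop (lines : List String) (label : List Char) (cur : List String) :
    List (List Char × List String) :=
  match lines with
  | [] => if cur.isEmpty then [] else [(label, cur)]
  | l :: rest =>
    let h := pvHeadCand l.toList
    if pvHeadings.contains h && h != label then
      (if cur.isEmpty then [] else [(label, cur)]) ++ pvSegLoop rest h [l]
    else
      pvSegLoop rest label (cur ++ [l])

def dedupe_resume_text_py_alt (text : String) : String :=
  let lines := PySem.Str.splitlines text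
  if lines.all (fun line => pvHeadCand line.toList != "technical skills".toList) then text
  else
    let out := (pvSegLoop lines "".toList []).foldl
      (fun acc seg =>
        if seg.1 == "core competencies".toList then
          acc ++ seg.2.filter (fun l => !pvIsTools l.toList)
        else acc ++ seg.2)
      []
    PySem.Str.strip (PySem.Str.join "\n" out)

-- ===== PRECONDITION & SPEC =====
def Spec_dedupe_resume_text_py (text : String) (out : String) : Prop := out = dedupe_resume_text_py_alt text
instance (text : String) (out : String) : Decidable (Spec_dedupe_resume_text_py text out) := by unfold Spec_dedupe_resume_text_py; infer_instance

-- ===== CLAIM (what is proved, stated in full; the proofs are below) =====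
def Claim_equal_dedupe_resume_text_py : Prop := ∀ (text : String), Dom_dedupe_resume_text_py text → Spec_dedupe_resume_text_py text (dedupe_resume_text_py text)

-- ===== LEMMAS AND PROOFS =====

-- what one line contributes in A, given the current section
def pvKeep (label : List Char) (l : String) : List String :=
  if label == "core competencies".toList && pvIsTools l.toList then [] else [l]

-- A's residual loop written as a recursion producing the appended lines
def pvARun (lines : List String) (label : List Char) : List String :=
  match lines with
  | [] => []
  | l :: rest =>
    let h := pvHeadCand l.toList
    let cur := if pvHeadings.contains h then h else label
    pvKeep cur l ++ pvARun rest cur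

theorem pvKeep_pos {cur : List Char} {l : String}
    (h : (cur == "core competencies".toList && pvIsTools l.toList) = true) :
    pvKeep cur l = [] := by unfold pvKeep; rw [h]; simp

theorem pvKeep_neg {cur : List Char} {l : String}
    (h : (cur == "core competencies".toList && pvIsTools l.toList) = false) :
    pvKeep cur l = [l] := by unfold pvKeep; rw [h]; simp

theorem pvA_foldl (lines : List String) (label : List Char) (acc : List String) :
    (lines.foldl
      (fun (st : List Char × List String) raw =>
        let heading_candidate := pvHeadCand raw.toList
        let current_section :=
          if pvHeadings.contains heading_candidate then heading_candidate else st.1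
        if current_section == "core competencies".toList && pvIsTools raw.toList then
          (current_section, st.2)
        else
          (current_section, st.2 ++ [raw]))
      (label, acc)).2 = acc ++ pvARun lines label := by
  induction lines generalizing label acc with
  | nil => simp [pvARun]
  | cons l rest ih =>
    simp only [List.foldl_cons, pvARun]
    cases hk : ((if pvHeadings.contains (pvHeadCand l.toList) then pvHeadCand l.toList
        else label) == "core competencies".toList && pvIsTools l.toList) with
    | false =>
      rw [if_neg (by simp), ih, pvKeep_neg hk]
      simp [List.append_assoc]
    | true =>
      rw [if_pos rfl, ih, pvKeep_pos hk]
      simp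

-- B's per-segment processing
def pvProc (label : List Char) (seg : List String) : List String :=
  if label == "core competencies".toList then seg.filter (fun l => !pvIsTools l.toList)
  else seg

theorem pvProc_append (label : List Char) (s t : List String) :
    pvProc label (s ++ t) = pvProc label s ++ pvProc label t := by
  unfold pvProc; split <;> simp

theorem pvProc_nil (label : List Char) : pvProc label [] = [] := by
  unfold pvProc; split <;> rfl

theorem pvProc_single (label : List Char) (l : String) :
    pvProc label [l] = pvKeep label l := by
  unfold pvProc pvKeep
  cases hpv : pvIsTools l.toList <;>
    by_cases h : (label == "core competencies".toList) = true <;>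
      simp_all [List.filter]

theorem pvB_flatten (segs : List (List Char × List String)) (acc : List String) :
    segs.foldl
      (fun acc seg =>
        if seg.1 == "core competencies".toList then
          acc ++ seg.2.filter (fun l => !pvIsTools l.toList)
        else acc ++ seg.2)
      acc = acc ++ (segs.map (fun s => pvProc s.1 s.2)).flatten := by
  induction segs generalizing acc with
  | nil => simp
  | cons s rest ih =>
    rw [List.foldl_cons, ih]
    simp only [pvProc, List.map_cons, List.flatten_cons]
    split_ifs <;> simp [List.append_assoc]

theorem pvOptSeg (label : List Char) (cur : List String) :
    ((if cur.isEmpty then [] else [(label, cur)]).map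
      (fun s => pvProc s.1 s.2)).flatten = pvProc label cur := by
  by_cases h : cur.isEmpty = true
  · have hcur : cur = [] := List.isEmpty_iff.mp h
    simp [hcur, pvProc_nil]
  · simp [h]

theorem pvSeg_main (lines : List String) (label : List Char) (cur : List String) :
    ((pvSegLoop lines label cur).map (fun s => pvProc s.1 s.2)).flatten
      = pvProc label cur ++ pvARun lines label := by
  induction lines generalizing label cur with
  | nil =>
    unfold pvSegLoop pvARun
    by_cases h : cur.isEmpty = true
    · have hcur : cur = [] := List.isEmpty_iff.mp h
      simp [hcur, pvProc_nil]
    · simp [h]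
  | cons l rest ih =>
    simp only [pvSegLoop, pvARun]
    by_cases hmem : pvHeadings.contains (pvHeadCand l.toList) = true
    · by_cases hlab : pvHeadCand l.toList = label
      · have hc : (pvHeadings.contains (pvHeadCand l.toList)
            && (pvHeadCand l.toList != label)) = false := by
          simp [hlab]
        rw [hc, if_neg (by simp), hmem, if_pos rfl, hlab, ih, pvProc_append,
          pvProc_single, List.append_assoc]
      · have hc : (pvHeadings.contains (pvHeadCand l.toList)
            && (pvHeadCand l.toList != label)) = true := by
          rw [hmem, Bool.true_and, bne_iff_ne]; exact hlab
        rw [hc, if_pos rfl, List.map_append, List.flatten_append, pvOptSeg,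
          ih, pvProc_single, hmem, if_pos rfl]
    · have hm0 : pvHeadings.contains (pvHeadCand l.toList) = false :=
        Bool.eq_false_iff.mpr hmem
      have hc : (pvHeadings.contains (pvHeadCand l.toList)
          && (pvHeadCand l.toList != label)) = false := by
        rw [hm0, Bool.false_and]
      rw [hc, if_neg (by simp), hm0, if_neg (by simp), ih, pvProc_append,
        pvProc_single, List.append_assoc]

theorem pv_not_any (lines : List String) :
    (!lines.any (fun line => pvHeadCand line.toList == "technical skills".toList))
      = lines.all (fun line => pvHeadCand line.toList != "technical skills".toList) := by
  induction lines with
  | nil => rfl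
  | cons l rest ih =>
    simp only [List.any_cons, List.all_cons, Bool.not_or, ← ih]
    rfl

-- ===== VERDICT (by name: the statement is the Claim_ definition above) =====
theorem dedupe_resume_text_py_spec : Claim_equal_dedupe_resume_text_py := by
  intro text _
  unfold Spec_dedupe_resume_text_py dedupe_resume_text_py dedupe_resume_text_py_alt
  simp only [pv_not_any]
  split
  · rfl
  · rw [pvA_foldl, pvB_flatten, pvSeg_main]
    simp [pvProc]
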